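-- pv_equiv track=rewrite | github.com/nexus382/Hell-Cache | generate_sprites.py | create_wall_texture
-- ===== SOURCE A (Python) =====
-- TRANSPARENT = (0, 0, 0, 0)  # Fully transparent
--
-- def create_wall_texture(size=32, wall_type='stone'):
--     """Create wall texture"""
--     pixels = [[TRANSPARENT] * size for _ in range(size)]
--
--     if wall_type == 'stone':
--         base = (100, 100, 110)
--         dark = (70, 70, 80)
--         light = (130, 130, 140)
--     elif wall_type == 'brick':
--         base = (140, 60, 50)
--         dark = (100, 40, 30)
--         light = (180, 90, 70)
--     elif wall_type == 'moss':
--         base = (60, 90, 60)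
--         dark = (40, 60, 40)
--         light = (80, 120, 80)
--
--     # Fill with base color
--     for y in range(size):
--         for x in range(size):
--             pixels[y][x] = base
--
--     # Add stone/brick pattern
--     for y in range(size):
--         for x in range(size):
--             # Brick pattern
--             brick_h = 8
--             brick_w = 16
--             row = y // brick_h
--             offset = (brick_w // 2) if row % 2 else 0
--
--             # Mortar lines
--             if y % brick_h == 0 or (x + offset) % brick_w == 0:
--                 pixels[y][x] = dark
--             # Random lighter spots for texture
--             elif (x * 7 + y * 13) % 23 < 3:
--                 pixels[y][x] = light
--             elif (x * 11 + y * 17) % 29 < 2: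
--                 pixels[y][x] = dark
--
--     return pixels
-- ===== SOURCE B (Python) =====
-- TRANSPARENT = (0, 0, 0, 0)  # Fully transparent
--
-- def create_wall_texture(size=32, wall_type='stone'):
--     """Create wall texture by layered passes: base fill, dark speckles,
--     light speckles (light wins), then mortar lines drawn structurally on top."""
--     if wall_type == 'stone':
--         base, dark, light = (100, 100, 110), (70, 70, 80), (130, 130, 140)
--     elif wall_type == 'brick':
--         base, dark, light = (140, 60, 50), (100, 40, 30), (180, 90, 70)
--     elif wall_type == 'moss':
--         base, dark, light = (60, 90, 60), (40, 60, 40), (80, 120, 80)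
--
--     # Base layer (base is first read here, so an unknown wall_type only
--     # fails when at least one pixel actually gets painted, like A).
--     pixels = [[base] * size for _ in range(size)]
--
--     # Dark speckle layer, then light speckle layer painted over it.
--     for y in range(size):
--         for x in range(size):
--             if (x * 11 + y * 17) % 29 < 2:
--                 pixels[y][x] = dark
--     for y in range(size):
--         for x in range(size):
--             if (x * 7 + y * 13) % 23 < 3:
--                 pixels[y][x] = light
--
--     # Mortar on top: whole horizontal lines every 8 rows,
--     # vertical joints every 16 columns with a half-brick offset on odd rows.
--     for y in range(0, size, 8):
--         pixels[y] = [dark] * size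
--     for y in range(size):
--         offset = 8 if (y // 8) % 2 else 0
--         for x in range(offset, size, 16):
--             pixels[y][x] = dark
--
--     return pixels
-- ===== Notes on version B (the rewrite author's own statement) =====
-- stated objective: alternative
-- what changed: B builds the texture by layered passes (base fill, dark speckle layer, light speckle layer painted over it, then mortar lines drawn structurally on top: whole rows every 8, vertical joints stepping by 16 from the row-parity offset) instead of A's single per-pixel pass with a priority if/elif chain.
import Mathlib
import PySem

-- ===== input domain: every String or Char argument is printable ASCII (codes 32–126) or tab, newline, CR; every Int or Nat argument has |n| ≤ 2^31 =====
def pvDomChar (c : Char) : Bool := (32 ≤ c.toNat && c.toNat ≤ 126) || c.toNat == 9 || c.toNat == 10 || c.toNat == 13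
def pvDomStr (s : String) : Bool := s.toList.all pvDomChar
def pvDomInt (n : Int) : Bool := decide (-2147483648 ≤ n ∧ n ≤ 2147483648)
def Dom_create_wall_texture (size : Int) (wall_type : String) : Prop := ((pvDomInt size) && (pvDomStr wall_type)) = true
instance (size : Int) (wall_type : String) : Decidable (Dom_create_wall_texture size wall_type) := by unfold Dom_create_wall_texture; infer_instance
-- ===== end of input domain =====

-- B re-implements A by layered passes (base, dark speckles, light speckles, mortar drawn
-- structurally on top) instead of A's single per-pixel priority chain; same output, same cost.

-- ===== PORT A =====

-- The if/elif palette chain shared verbatim by both Pythons; the final arm is never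
-- reached under Pre_ when a pixel is painted (Python raises NameError there).
def pvPalette (wall_type : String) : List Int × List Int × List Int :=
  if wall_type = "stone" then ([100, 100, 110], [70, 70, 80], [130, 130, 140])
  else if wall_type = "brick" then ([140, 60, 50], [100, 40, 30], [180, 90, 70])
  else if wall_type = "moss" then ([60, 90, 60], [40, 60, 40], [80, 120, 80])
  else ([], [], [])

-- pixels[y][x] = v : read row y, set cell x, write row back (exact for the
-- in-range non-negative indices both programs' loops produce).
def pvPut (px : List (List (List Int))) (y x : Int) (v : List Int) : List (List (List Int)) :=
  PySem.List.pySetD px y (PySem.List.pySetD (PySem.List.pyGetD px y []) x v)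

def create_wall_texture (size : Int) (wall_type : String) : List (List (List Int)) :=
  -- [[TRANSPARENT]*size for _ in range(size)] ([x]*size is [] for size ≤ 0)
  let pixels := (PySem.List.pyRange 0 size 1).map
    (fun _ => List.replicate size.toNat ([0, 0, 0, 0] : List Int))
  let pal := pvPalette wall_type
  let base := pal.1
  let dark := pal.2.1
  let light := pal.2.2
  -- fill with base color
  let pixels := (PySem.List.pyRange 0 size 1).foldl (fun px y =>
    (PySem.List.pyRange 0 size 1).foldl (fun px x => pvPut px y x base) px) pixels
  -- stone/brick pattern: mortar, else light spots, else dark spots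
  (PySem.List.pyRange 0 size 1).foldl (fun px y =>
    (PySem.List.pyRange 0 size 1).foldl (fun px x =>
      let row := PySem.Int.floordiv y 8
      let offset : Int := if PySem.Int.mod row 2 ≠ 0 then 8 else 0
      if PySem.Int.mod y 8 = 0 ∨ PySem.Int.mod (x + offset) 16 = 0 then pvPut px y x dark
      else if PySem.Int.mod (x * 7 + y * 13) 23 < 3 then pvPut px y x light
      else if PySem.Int.mod (x * 11 + y * 17) 29 < 2 then pvPut px y x dark
      else px) px) pixels

-- ===== PORT B =====

def create_wall_texture_alt (size : Int) (wall_type : String) : List (List (List Int)) :=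
  let pal := pvPalette wall_type
  let base := pal.1
  let dark := pal.2.1
  let light := pal.2.2
  -- base layer: [[base]*size for _ in range(size)]
  let pixels := (PySem.List.pyRange 0 size 1).map (fun _ => List.replicate size.toNat base)
  -- dark speckle layer
  let pixels := (PySem.List.pyRange 0 size 1).foldl (fun px y =>
    (PySem.List.pyRange 0 size 1).foldl (fun px x =>
      if PySem.Int.mod (x * 11 + y * 17) 29 < 2 then pvPut px y x dark else px) px) pixels
  -- light speckle layer painted over it
  let pixels := (PySem.List.pyRange 0 size 1).foldl (fun px y =>
    (PySem.List.pyRange 0 size 1).foldl (fun px x =>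
      if PySem.Int.mod (x * 7 + y * 13) 23 < 3 then pvPut px y x light else px) px) pixels
  -- mortar on top: whole horizontal lines every 8 rows
  let pixels := (PySem.List.pyRange 0 size 8).foldl (fun px y =>
    PySem.List.pySetD px y (List.replicate size.toNat dark)) pixels
  -- vertical joints every 16 columns, half-brick offset on odd brick rows
  (PySem.List.pyRange 0 size 1).foldl (fun px y =>
    let offset : Int := if PySem.Int.mod (PySem.Int.floordiv y 8) 2 ≠ 0 then 8 else 0
    (PySem.List.pyRange offset size 16).foldl (fun px x => pvPut px y x dark) px) pixels

-- ===== PRECONDITION & SPEC =====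

-- Pre_ excludes exactly the inputs where Python A raises NameError (size > 0 with an
-- unknown wall_type: base/dark/light are unbound when the first pixel is painted);
-- B raises NameError on exactly the same inputs.
def Pre_create_wall_texture (size : Int) (wall_type : String) : Prop :=
  size ≤ 0 ∨ wall_type = "stone" ∨ wall_type = "brick" ∨ wall_type = "moss"
instance (size : Int) (wall_type : String) : Decidable (Pre_create_wall_texture size wall_type) := by
  unfold Pre_create_wall_texture; infer_instance

def pvWitness_create_wall_texture : Int × String := (4, "stone")

def Spec_create_wall_texture (size : Int) (wall_type : String) (out : List (List (List Int))) : Prop := out = create_wall_texture_alt size wall_type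
instance (size : Int) (wall_type : String) (out : List (List (List Int))) : Decidable (Spec_create_wall_texture size wall_type out) := by unfold Spec_create_wall_texture; infer_instance

-- ===== CLAIM (what is proved, stated in full; the proofs are below) =====
def Claim_equal_create_wall_texture : Prop := ∀ (size : Int) (wall_type : String), Dom_create_wall_texture size wall_type → Pre_create_wall_texture size wall_type → Spec_create_wall_texture size wall_type (create_wall_texture size wall_type)

-- ===== LEMMAS AND PROOFS =====

-- A fold whose step fixes the accumulator is the identity.
theorem pv_foldl_fix {α β : Type} (l : List β) (f : α → β → α) (a : α)
    (h : ∀ x ∈ l, f a x = a) : l.foldl f a = a := by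
  induction l with
  | nil => rfl
  | cons b t ih =>
    simp only [List.foldl_cons, h b (by simp)]
    exact ih (fun x hx => h x (by simp [hx]))

-- Length-preserving steps preserve the length through a fold.
theorem pv_foldl_len {α β : Type} (l : List β) (f : List α → β → List α)
    (h : ∀ a x, (f a x).length = a.length) (a : List α) :
    (l.foldl f a).length = a.length := by
  induction l generalizing a with
  | nil => rfl
  | cons b t ih => simp only [List.foldl_cons, ih, h]

-- Sparse constant writes: cell x of a fold of `set i w` over an index list.
theorem pv_sparse_get {α : Type} (l : List Nat) (w : α) (r : List α) (x : Nat) :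
    (l.foldl (fun r i => r.set i w) r)[x]? =
      if x ∈ l ∧ x < r.length then some w else r[x]? := by
  induction l generalizing r with
  | nil => simp
  | cons i t ih =>
    simp only [List.foldl_cons, ih, List.length_set, List.getElem?_set, List.mem_cons]
    by_cases hix : i = x
    · subst hix
      by_cases hlt : i < r.length
      · simp [hlt]
      · simp [hlt]
    · by_cases hx : x ∈ t
      · by_cases hlt : x < r.length
        · simp [hx, hlt]
        · simp [hx, hlt, hix]
      · simp [hx, hix, Ne.symm hix]

-- Conditional writes over a full range: cell x of the row pass.
theorem pv_row_get {α : Type} (m : Nat) (c : Nat → Prop) [DecidablePred c]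
    (v : Nat → α) (r : List α) (x : Nat) :
    ((List.range m).foldl (fun r i => if c i then r.set i (v i) else r) r)[x]? =
      if x < m ∧ c x then (if x < r.length then some (v x) else none) else r[x]? := by
  induction m with
  | zero => simp
  | succ m ih =>
    have hlen : ((List.range m).foldl (fun r i => if c i then r.set i (v i) else r) r).length
        = r.length :=
      pv_foldl_len _ _ (fun a i => by split <;> simp) r
    rw [List.range_succ, List.foldl_append]
    simp only [List.foldl_cons, List.foldl_nil]
    by_cases hcm : c m
    · rw [if_pos hcm, List.getElem?_set, hlen, ih]
      by_cases hxm : m = x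
      · subst hxm
        have h2 : m < m + 1 ∧ c m := ⟨Nat.lt_succ_self m, hcm⟩
        have h3 : ¬ (m < m ∧ c m) := by rintro ⟨h, _⟩; omega
        rw [if_pos rfl, if_pos h2]
      · have hxe : (x < m + 1 ∧ c x) = (x < m ∧ c x) := by
          refine propext ⟨fun ⟨h2, h3⟩ => ⟨by omega, h3⟩, fun ⟨h2, h3⟩ => ⟨by omega, h3⟩⟩
        rw [if_neg hxm]; simp only [hxe]
    · rw [if_neg hcm, ih]
      have hxe : (x < m + 1 ∧ c x) = (x < m ∧ c x) := by
        refine propext ⟨fun ⟨h2, h3⟩ => ⟨?_, h3⟩, fun ⟨h2, h3⟩ => ⟨by omega, h3⟩⟩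
        rcases Nat.lt_succ_iff_lt_or_eq.mp h2 with h | h
        · exact h
        · exact absurd (h ▸ h3) hcm
      simp only [hxe]

-- A grid fold writing only cells of row y equals replacing row y by the row-level fold
-- (sparse constant form).
theorem pv_inner_sparse {α : Type} (l : List Nat) (y : Nat) (w : α)
    (px : List (List α)) :
    l.foldl (fun g i => g.set y ((g.getD y []).set i w)) px =
      px.set y (l.foldl (fun r i => r.set i w) (px.getD y [])) := by
  by_cases hy : y < px.length
  · induction l generalizing px with
    | nil =>
      simp only [List.foldl_nil]
      rw [List.getD_eq_getElem _ _ hy, List.set_getElem_self]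
    | cons i t ih =>
      simp only [List.foldl_cons]
      have hrow : (px.set y ((px.getD y []).set i w)).getD y [] = (px.getD y []).set i w := by
        rw [List.getD_eq_getElem _ _ (by simpa using hy)]
        exact List.getElem_set_self _
      rw [ih _ (by simpa using hy), hrow, List.set_set]
  · rw [List.set_eq_of_length_le (Nat.le_of_not_lt hy)]
    exact pv_foldl_fix _ _ _ (fun i _ => List.set_eq_of_length_le (Nat.le_of_not_lt hy))

-- Same, conditional-write form over a full range.
theorem pv_inner_row {α : Type} (m : Nat) (y : Nat) (c : Nat → Prop) [DecidablePred c]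
    (v : Nat → α) (px : List (List α)) :
    (List.range m).foldl
        (fun g i => if c i then g.set y ((g.getD y []).set i (v i)) else g) px =
      px.set y ((List.range m).foldl (fun r i => if c i then r.set i (v i) else r)
        (px.getD y [])) := by
  by_cases hy : y < px.length
  · induction m with
    | zero =>
      simp only [List.range_zero, List.foldl_nil]
      rw [List.getD_eq_getElem _ _ hy, List.set_getElem_self]
    | succ m ih =>
      rw [List.range_succ, List.foldl_append, List.foldl_append]
      simp only [List.foldl_cons, List.foldl_nil]
      rw [ih]
      generalize (List.range m).foldl (fun r i => if c i then r.set i (v i) else r)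
        (px.getD y []) = R
      have hrow : (px.set y R).getD y [] = R := by
        rw [List.getD_eq_getElem _ _ (by simpa using hy)]
        exact List.getElem_set_self _
      rw [hrow, List.set_set]
      split <;> rfl
  · rw [List.set_eq_of_length_le (Nat.le_of_not_lt hy)]
    refine pv_foldl_fix _ _ _ (fun i _ => ?_)
    split
    · exact List.set_eq_of_length_le (Nat.le_of_not_lt hy)
    · rfl

-- Row y after a whole-row-replacement pass.
theorem pv_outer_get {α : Type} (n : Nat) (F : Nat → α → α) (d : α)
    (px : List α) (y : Nat) :
    ((List.range n).foldl (fun g i => g.set i (F i (g.getD i d))) px)[y]? =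
      if y < n then px[y]?.map (F y) else px[y]? := by
  induction n with
  | zero => simp
  | succ n ih =>
    have hlen : ((List.range n).foldl (fun g i => g.set i (F i (g.getD i d))) px).length
        = px.length := pv_foldl_len _ _ (fun a i => List.length_set) px
    rw [List.range_succ, List.foldl_append]
    simp only [List.foldl_cons, List.foldl_nil]
    rw [List.getElem?_set]
    by_cases hny : n = y
    · subst hny
      by_cases h : n < px.length
      · rw [if_pos rfl, if_pos (hlen ▸ h), List.getD_eq_getElem _ _ (hlen ▸ h)]
        have h1 := ih
        rw [if_neg (by omega)] at h1
        have hsome : (((List.range n).foldl (fun g i => g.set i (F i (g.getD i d))) px))[n]'(hlen ▸ h) = px[n]'h := by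
          rw [List.getElem?_eq_getElem (hlen ▸ h), List.getElem?_eq_getElem h] at h1
          exact Option.some_injective _ h1
        rw [hsome, List.getElem?_eq_getElem h]
        simp
      · rw [if_pos rfl, if_neg (hlen ▸ h), List.getElem?_eq_none (by omega)]
        simp
    · rw [if_neg hny, ih]
      by_cases h1 : y < n
      · simp [h1, Nat.lt_succ_of_lt h1]
      · have : ¬ y < n + 1 := by omega
        simp [h1, this]

-- Membership through `Int.toNat` on a list of non-negative integers.
theorem pv_mem_map_toNat (l : List Int) (h : ∀ i ∈ l, 0 ≤ i) (x : Nat) :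
    x ∈ l.map Int.toNat ↔ (x : Int) ∈ l := by
  simp only [List.mem_map]
  constructor
  · rintro ⟨i, hi, rfl⟩
    have := h i hi
    have : ((i.toNat : Int)) = i := Int.toNat_of_nonneg this
    rwa [this]
  · intro hx
    exact ⟨(x : Int), hx, by simp⟩

-- pixels[y][x] = v on cast indices.
theorem pv_put_natCast (px : List (List (List Int))) (y x : Nat) (v : List Int) :
    pvPut px (y : Int) (x : Int) v = px.set y ((px.getD y []).set x v) := by
  simp [pvPut]

-- A's if/elif chain as one conditional write.
theorem pv_stepA {α : Type} (px : List (List α)) (y x : Nat) (d l' : α)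
    (c1 c2 c3 : Prop) [Decidable c1] [Decidable c2] [Decidable c3] :
    (if c1 then px.set y ((px.getD y []).set x d)
     else if c2 then px.set y ((px.getD y []).set x l')
     else if c3 then px.set y ((px.getD y []).set x d)
     else px) =
    (if c1 ∨ c2 ∨ c3 then
       px.set y ((px.getD y []).set x (if c1 then d else if c2 then l' else d))
     else px) := by
  split_ifs <;> first | rfl | tauto

-- The common per-cell value both programs compute.
def pvCell (wall_type : String) (y x : Nat) : List Int :=
  let pal := pvPalette wall_type
  if PySem.Int.mod (y : Int) 8 = 0 ∨ PySem.Int.mod ((x : Int) +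
      if PySem.Int.mod (PySem.Int.floordiv (y : Int) 8) 2 ≠ 0 then 8 else 0) 16 = 0 then pal.2.1
  else if PySem.Int.mod ((x : Int) * 7 + (y : Int) * 13) 23 < 3 then pal.2.2
  else if PySem.Int.mod ((x : Int) * 11 + (y : Int) * 17) 29 < 2 then pal.2.1
  else pal.1

def pvGrid (size : Int) (wall_type : String) : List (List (List Int)) :=
  (List.range size.toNat).map (fun y =>
    (List.range size.toNat).map (fun x => pvCell wall_type y x))

-- Named row passes (definitionally the row-level folds the ports reduce to).
-- pvRowBase takes the (unused) row index so it can serve as the F of pv_outer_get.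
def pvRowBase (pal : List Int × List Int × List Int) (n : Nat) (_y : Nat)
    (r : List (List Int)) : List (List Int) :=
  (List.range n).foldl (fun (r : List (List Int)) (i : Nat) => r.set i pal.1) r

def pvRowPatA (pal : List Int × List Int × List Int) (n y : Nat) (r : List (List Int)) :
    List (List Int) :=
  (List.range n).foldl (fun (r : List (List Int)) (i : Nat) =>
    if (PySem.Int.mod (y : Int) 8 = 0 ∨ PySem.Int.mod ((i : Int) +
          if PySem.Int.mod (PySem.Int.floordiv (y : Int) 8) 2 ≠ 0 then 8 else 0) 16 = 0) ∨
        PySem.Int.mod ((i : Int) * 7 + (y : Int) * 13) 23 < 3 ∨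
        PySem.Int.mod ((i : Int) * 11 + (y : Int) * 17) 29 < 2 then
      r.set i
        (if PySem.Int.mod (y : Int) 8 = 0 ∨ PySem.Int.mod ((i : Int) +
              if PySem.Int.mod (PySem.Int.floordiv (y : Int) 8) 2 ≠ 0 then 8 else 0) 16 = 0 then
          pal.2.1
        else if PySem.Int.mod ((i : Int) * 7 + (y : Int) * 13) 23 < 3 then pal.2.2
        else pal.2.1)
    else r) r

def pvRowDark (pal : List Int × List Int × List Int) (n y : Nat) (r : List (List Int)) :
    List (List Int) :=
  (List.range n).foldl (fun (r : List (List Int)) (i : Nat) =>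
    if PySem.Int.mod ((i : Int) * 11 + (y : Int) * 17) 29 < 2 then r.set i pal.2.1 else r) r

def pvRowLight (pal : List Int × List Int × List Int) (n y : Nat) (r : List (List Int)) :
    List (List Int) :=
  (List.range n).foldl (fun (r : List (List Int)) (i : Nat) =>
    if PySem.Int.mod ((i : Int) * 7 + (y : Int) * 13) 23 < 3 then r.set i pal.2.2 else r) r

def pvRowVert (size : Int) (pal : List Int × List Int × List Int) (y : Nat)
    (r : List (List Int)) : List (List Int) :=
  (PySem.List.pyRange
      (if PySem.Int.mod (PySem.Int.floordiv (y : Int) 8) 2 ≠ 0 then 8 else 0) size 16).foldl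
    (fun (r : List (List Int)) (i : Int) => r.set i.toNat pal.2.1) r

-- Int-indexed variants (indices written as i.toNat, as the ports do).
theorem pv_sparse_get_int {α : Type} (l : List Int) (h0 : ∀ i ∈ l, 0 ≤ i) (w : α)
    (r : List α) (x : Nat) :
    (l.foldl (fun r i => r.set i.toNat w) r)[x]? =
      if (x : Int) ∈ l ∧ x < r.length then some w else r[x]? := by
  have h := pv_sparse_get (l.map Int.toNat) w r x
  rw [List.foldl_map] at h
  rw [h]
  simp only [pv_mem_map_toNat l h0]

theorem pv_inner_sparse_int {α : Type} (l : List Int) (y : Nat) (w : α)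
    (px : List (List α)) :
    l.foldl (fun g i => g.set y ((g.getD y []).set i.toNat w)) px =
      px.set y (l.foldl (fun r i => r.set i.toNat w) (px.getD y [])) := by
  have h := pv_inner_sparse (l.map Int.toNat) y w px
  rw [List.foldl_map, List.foldl_map] at h
  exact h

-- Pass-shape lemmas: each grid-level pass replaces row y by its named row function.
theorem pv_base_inner (pal : List Int × List Int × List Int) (n y : Nat)
    (px : List (List (List Int))) :
    (List.range n).foldl (fun (px : List (List (List Int))) (i : Nat) => px.set y ((px.getD y []).set i pal.1)) px
      = px.set y (pvRowBase pal n y (px.getD y [])) :=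
  pv_inner_sparse (List.range n) y pal.1 px

theorem pv_patA_inner (pal : List Int × List Int × List Int) (n y : Nat)
    (px : List (List (List Int))) :
    (List.range n).foldl (fun (px : List (List (List Int))) (i : Nat) =>
      if PySem.Int.mod (y : Int) 8 = 0 ∨ PySem.Int.mod ((i : Int) +
            if PySem.Int.mod (PySem.Int.floordiv (y : Int) 8) 2 ≠ 0 then 8 else 0) 16 = 0 then
        px.set y ((px.getD y []).set i pal.2.1)
      else if PySem.Int.mod ((i : Int) * 7 + (y : Int) * 13) 23 < 3 then
        px.set y ((px.getD y []).set i pal.2.2)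
      else if PySem.Int.mod ((i : Int) * 11 + (y : Int) * 17) 29 < 2 then
        px.set y ((px.getD y []).set i pal.2.1)
      else px) px
      = px.set y (pvRowPatA pal n y (px.getD y [])) := by
  simp only [pv_stepA]
  exact pv_inner_row n y
    (fun i => (PySem.Int.mod (y : Int) 8 = 0 ∨ PySem.Int.mod ((i : Int) +
          if PySem.Int.mod (PySem.Int.floordiv (y : Int) 8) 2 ≠ 0 then 8 else 0) 16 = 0) ∨
        PySem.Int.mod ((i : Int) * 7 + (y : Int) * 13) 23 < 3 ∨
        PySem.Int.mod ((i : Int) * 11 + (y : Int) * 17) 29 < 2)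
    (fun i =>
      if PySem.Int.mod (y : Int) 8 = 0 ∨ PySem.Int.mod ((i : Int) +
            if PySem.Int.mod (PySem.Int.floordiv (y : Int) 8) 2 ≠ 0 then 8 else 0) 16 = 0 then
        pal.2.1
      else if PySem.Int.mod ((i : Int) * 7 + (y : Int) * 13) 23 < 3 then pal.2.2
      else pal.2.1) px

theorem pv_dark_inner (pal : List Int × List Int × List Int) (n y : Nat)
    (px : List (List (List Int))) :
    (List.range n).foldl (fun (px : List (List (List Int))) (i : Nat) =>
      if PySem.Int.mod ((i : Int) * 11 + (y : Int) * 17) 29 < 2 then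
        px.set y ((px.getD y []).set i pal.2.1)
      else px) px
      = px.set y (pvRowDark pal n y (px.getD y [])) :=
  pv_inner_row n y (fun i => PySem.Int.mod ((i : Int) * 11 + (y : Int) * 17) 29 < 2)
    (fun _ => pal.2.1) px

theorem pv_light_inner (pal : List Int × List Int × List Int) (n y : Nat)
    (px : List (List (List Int))) :
    (List.range n).foldl (fun (px : List (List (List Int))) (i : Nat) =>
      if PySem.Int.mod ((i : Int) * 7 + (y : Int) * 13) 23 < 3 then
        px.set y ((px.getD y []).set i pal.2.2)
      else px) px
      = px.set y (pvRowLight pal n y (px.getD y [])) :=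
  pv_inner_row n y (fun i => PySem.Int.mod ((i : Int) * 7 + (y : Int) * 13) 23 < 3)
    (fun _ => pal.2.2) px

-- B's vertical-joint inner loop replaces row y by pvRowVert.
theorem pv_vert_inner (size : Int) (pal : List Int × List Int × List Int) (y : Nat)
    (px : List (List (List Int))) :
    (PySem.List.pyRange
        (if PySem.Int.mod (PySem.Int.floordiv (y : Int) 8) 2 ≠ 0 then 8 else 0) size 16).foldl
      (fun px x => pvPut px (y : Int) x pal.2.1) px
      = px.set y (pvRowVert size pal y (px.getD y [])) := by
  have hcongr : (PySem.List.pyRange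
        (if PySem.Int.mod (PySem.Int.floordiv (y : Int) 8) 2 ≠ 0 then 8 else 0) size 16).foldl
      (fun px x => pvPut px (y : Int) x pal.2.1) px
      = (PySem.List.pyRange
        (if PySem.Int.mod (PySem.Int.floordiv (y : Int) 8) 2 ≠ 0 then 8 else 0) size 16).foldl
      (fun px x => px.set y ((px.getD y []).set x.toNat pal.2.1)) px := by
    refine PySem.List.foldl_congr_mem _ _ _ _ (fun acc x hx => ?_)
    have hx0 : 0 ≤ x := by
      have h := (PySem.List.mem_pyRange_iff_of_pos (by norm_num) x).mp hx
      have h8 : (0:Int) ≤ if PySem.Int.mod (PySem.Int.floordiv (y : Int) 8) 2 ≠ 0 then 8 else 0 := by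
        split <;> norm_num
      omega
    simp [pvPut, PySem.List.pySetD_of_nonneg _ _ hx0]
  rw [hcongr]
  exact pv_inner_sparse_int _ _ _ _

-- B's horizontal-mortar loop with its writes on Nat indices.
theorem pv_horiz (size : Int) (pal : List Int × List Int × List Int)
    (px : List (List (List Int))) :
    (PySem.List.pyRange 0 size 8).foldl
        (fun px y => PySem.List.pySetD px y (List.replicate size.toNat pal.2.1)) px
      = (PySem.List.pyRange 0 size 8).foldl
        (fun px y => px.set y.toNat (List.replicate size.toNat pal.2.1)) px := by
  refine PySem.List.foldl_congr_mem _ _ _ _ (fun acc x hx => ?_)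
  have hx0 : 0 ≤ x := by
    have h := (PySem.List.mem_pyRange_iff_of_pos (by norm_num) x).mp hx
    omega
  simp [PySem.List.pySetD_of_nonneg _ _ hx0]

theorem pv_A_char (size : Int) (wall_type : String) :
    create_wall_texture size wall_type = pvGrid size wall_type := by
  simp only [create_wall_texture, pvGrid, PySem.List.pyRange_one, sub_zero, zero_add,
    List.foldl_map, List.map_map, Function.comp_def, pv_put_natCast]
  simp only [pv_base_inner, pv_patA_inner]
  apply List.ext_getElem?
  intro y
  rw [pv_outer_get size.toNat (pvRowPatA (pvPalette wall_type) size.toNat) [],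
    pv_outer_get size.toNat (pvRowBase (pvPalette wall_type) size.toNat) []]
  by_cases hy : y < size.toNat
  · simp only [hy, if_true, List.getElem?_map, List.getElem?_range hy, Option.map_some]
    refine congrArg some ?_
    apply List.ext_getElem?
    intro x
    simp only [pvRowPatA, pvRowBase]
    rw [pv_row_get]
    have hL : ((List.range size.toNat).foldl
        (fun (r : List (List Int)) (i : Nat) => r.set i (pvPalette wall_type).1)
        (List.replicate size.toNat ([0, 0, 0, 0] : List Int))).length = size.toNat := by
      rw [pv_foldl_len _ _ (fun a i => List.length_set)]
      simp
    rw [hL, pv_sparse_get]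
    simp only [List.length_replicate, List.mem_range, List.getElem?_replicate,
      List.getElem?_map]
    by_cases hx : x < size.toNat
    · simp only [hx, and_self, if_true, List.getElem?_range hx, Option.map_some]
      simp only [pvCell]
      split_ifs <;> first | rfl | tauto
    · simp [hx]
  · simp [hy]

theorem pv_B_char (size : Int) (wall_type : String) :
    create_wall_texture_alt size wall_type = pvGrid size wall_type := by
  have h08 : ∀ i ∈ PySem.List.pyRange 0 size 8, 0 ≤ i := fun i hi => by
    have := (PySem.List.mem_pyRange_iff_of_pos (by norm_num) i).mp hi
    omega
  simp only [create_wall_texture_alt, pvGrid, PySem.List.pyRange_one, sub_zero, zero_add,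
    List.foldl_map, List.map_map, Function.comp_def, pv_put_natCast]
  simp only [pv_dark_inner, pv_light_inner, pv_vert_inner]
  rw [pv_horiz]
  apply List.ext_getElem?
  intro y
  rw [pv_outer_get size.toNat (pvRowVert size (pvPalette wall_type)) []]
  rw [pv_sparse_get_int (PySem.List.pyRange 0 size 8) h08]
  rw [pv_outer_get size.toNat (pvRowLight (pvPalette wall_type) size.toNat) [],
      pv_outer_get size.toNat (pvRowDark (pvPalette wall_type) size.toNat) []]
  have hGlen : ((List.range size.toNat).foldl
      (fun (x : List (List (List Int))) (y : Nat) =>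
        x.set y (pvRowLight (pvPalette wall_type) size.toNat y (x.getD y [])))
      ((List.range size.toNat).foldl
        (fun (x : List (List (List Int))) (y : Nat) =>
          x.set y (pvRowDark (pvPalette wall_type) size.toNat y (x.getD y [])))
        (List.map (fun _ => List.replicate size.toNat (pvPalette wall_type).1)
          (List.range size.toNat)))).length = size.toNat := by
    rw [pv_foldl_len _ _ (fun a i => List.length_set),
      pv_foldl_len _ _ (fun a i => List.length_set)]
    simp
  rw [hGlen]
  by_cases hy : y < size.toNat
  · simp only [hy, if_true, and_true, List.getElem?_map, List.getElem?_range hy, Option.map_some]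
    have hsy : (y : Int) < size := by omega
    have e1 : ((y : Int) ∈ PySem.List.pyRange 0 size 8) ↔ PySem.Int.mod (y : Int) 8 = 0 := by
      rw [PySem.List.mem_pyRange_iff_of_pos (by norm_num), PySem.Int.mod_eq_zero_iff_dvd]
      constructor
      · rintro ⟨-, -, h⟩; omega
      · intro h; exact ⟨by omega, hsy, by omega⟩
    have h16 : ∀ i ∈ PySem.List.pyRange
        (if PySem.Int.mod (PySem.Int.floordiv (y : Int) 8) 2 ≠ 0 then 8 else 0) size 16,
        0 ≤ i := by
      intro i hi
      have h := (PySem.List.mem_pyRange_iff_of_pos (by norm_num) i).mp hi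
      have hoff : (0:Int) ≤ if PySem.Int.mod (PySem.Int.floordiv (y : Int) 8) 2 ≠ 0 then 8 else 0 := by
        split <;> norm_num
      omega
    have hdlen : ((List.range size.toNat).foldl
        (fun (r : List (List Int)) (i : Nat) =>
          if PySem.Int.mod ((i : Int) * 11 + (y : Int) * 17) 29 < 2 then
            r.set i (pvPalette wall_type).2.1 else r)
        (List.replicate size.toNat (pvPalette wall_type).1)).length = size.toNat := by
      rw [pv_foldl_len _ _ (fun a i => by split <;> simp)]
      simp
    have hrlen : ((List.range size.toNat).foldl
        (fun (r : List (List Int)) (i : Nat) =>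
          if PySem.Int.mod ((i : Int) * 7 + (y : Int) * 13) 23 < 3 then
            r.set i (pvPalette wall_type).2.2 else r)
        ((List.range size.toNat).foldl
          (fun (r : List (List Int)) (i : Nat) =>
            if PySem.Int.mod ((i : Int) * 11 + (y : Int) * 17) 29 < 2 then
              r.set i (pvPalette wall_type).2.1 else r)
          (List.replicate size.toNat (pvPalette wall_type).1))).length = size.toNat := by
      rw [pv_foldl_len _ _ (fun a i => by split <;> simp)]
      exact hdlen
    by_cases hmem : ((y : Int)) ∈ PySem.List.pyRange 0 size 8
    · simp only [hmem, if_true, Option.map_some]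
      refine congrArg some ?_
      apply List.ext_getElem?
      intro x
      simp only [pvRowVert]
      rw [pv_sparse_get_int _ h16]
      simp only [List.length_replicate, List.getElem?_replicate, List.getElem?_map]
      by_cases hx : x < size.toNat
      · simp only [hx, and_true, if_true, List.getElem?_range hx, Option.map_some]
        have hmod : PySem.Int.mod (y : Int) 8 = 0 := e1.mp hmem
        simp only [pvCell, hmod, true_or, if_true]
        rw [ite_self]
      · simp [hx]
    · simp only [hmem, if_false, Option.map_some]
      refine congrArg some ?_
      apply List.ext_getElem?
      intro x
      simp only [pvRowVert, pvRowLight, pvRowDark]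
      rw [pv_sparse_get_int _ h16]
      simp only [hrlen]
      rw [pv_row_get]
      simp only [hdlen]
      rw [pv_row_get]
      simp only [List.length_replicate, List.getElem?_replicate, List.getElem?_map]
      by_cases hx : x < size.toNat
      · have hsx : (x : Int) < size := by omega
        have e2 : ((x : Int) ∈ PySem.List.pyRange
            (if PySem.Int.mod (PySem.Int.floordiv (y : Int) 8) 2 ≠ 0 then 8 else 0) size 16)
            ↔ PySem.Int.mod ((x : Int) +
              (if PySem.Int.mod (PySem.Int.floordiv (y : Int) 8) 2 ≠ 0 then 8 else 0)) 16 = 0 := by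
          by_cases hpar : PySem.Int.mod (PySem.Int.floordiv (y : Int) 8) 2 ≠ 0
          · rw [if_pos hpar]
            rw [PySem.List.mem_pyRange_iff_of_pos (by norm_num), PySem.Int.mod_eq_zero_iff_dvd]
            constructor
            · rintro ⟨-, -, h⟩; omega
            · intro h; exact ⟨by omega, hsx, by omega⟩
          · rw [if_neg hpar]
            rw [PySem.List.mem_pyRange_iff_of_pos (by norm_num), PySem.Int.mod_eq_zero_iff_dvd]
            constructor
            · rintro ⟨-, -, h⟩; omega
            · intro h; exact ⟨by omega, hsx, by omega⟩
        have hy8 : ¬ PySem.Int.mod (y : Int) 8 = 0 := fun h => hmem (e1.mpr h)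
        simp only [hx, and_true, if_true, List.getElem?_range hx, Option.map_some]
        simp only [pvCell, hy8, false_or]
        simp only [e2]
        split_ifs <;> first | rfl | tauto
      · simp [hx]
  · simp [hy]

-- ===== VERDICT (by name: the statement is the Claim_ definition above) =====
theorem create_wall_texture_spec : Claim_equal_create_wall_texture := by
  intro size wall_type _ _
  unfold Spec_create_wall_texture
  rw [pv_A_char, pv_B_char]
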